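-- pv_equiv track=rewrite | github.com/yoshihito-saito/PreprocessPipeline | src/preprocess/events.py | _normalize_channel_indices
-- ===== SOURCE A (Python) =====
-- def _normalize_channel_indices(channels: list[int] | None, n_channels: int) -> list[int]:
--     if n_channels <= 0:
--         return []
--     if not channels:
--         return list(range(n_channels))
--
--     vals = [int(ch) for ch in channels]
--     if min(vals) >= 1 and max(vals) <= n_channels:
--         vals = [v - 1 for v in vals]
--     vals = sorted(set(v for v in vals if 0 <= v < n_channels))
--     return vals
-- ===== SOURCE B (Python) =====
-- def _dmerge(a, b):
--     out = []
--     i = j = 0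
--     while i < len(a) and j < len(b):
--         if a[i] < b[j]:
--             out.append(a[i]); i += 1
--         elif b[j] < a[i]:
--             out.append(b[j]); j += 1
--         else:
--             out.append(a[i]); i += 1; j += 1
--     out.extend(a[i:])
--     out.extend(b[j:])
--     return out
--
-- def _msort(xs):
--     if len(xs) <= 1:
--         return xs
--     mid = len(xs) // 2
--     return _dmerge(_msort(xs[:mid]), _msort(xs[mid:]))
--
-- def _normalize_channel_indices(channels, n_channels):
--     if n_channels <= 0:
--         return []
--     if not channels:
--         return list(range(n_channels))
--
--     vals = [int(ch) for ch in channels]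
--     offset = 1 if all(1 <= v <= n_channels for v in vals) else 0
--     return _msort([v - offset for v in vals if 0 <= v - offset < n_channels])
-- ===== Notes on version B (the rewrite author's own statement) =====
-- stated objective: alternative
-- what changed: replaces the min/max one-based probe by an all() scan and the hash set plus library comparison sort (sorted(set(...))) by a hand-written divide-and-conquer merge sort whose merge step fuses deduplication (equal heads emit once), so no set and no library sort are used
import Mathlib
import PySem

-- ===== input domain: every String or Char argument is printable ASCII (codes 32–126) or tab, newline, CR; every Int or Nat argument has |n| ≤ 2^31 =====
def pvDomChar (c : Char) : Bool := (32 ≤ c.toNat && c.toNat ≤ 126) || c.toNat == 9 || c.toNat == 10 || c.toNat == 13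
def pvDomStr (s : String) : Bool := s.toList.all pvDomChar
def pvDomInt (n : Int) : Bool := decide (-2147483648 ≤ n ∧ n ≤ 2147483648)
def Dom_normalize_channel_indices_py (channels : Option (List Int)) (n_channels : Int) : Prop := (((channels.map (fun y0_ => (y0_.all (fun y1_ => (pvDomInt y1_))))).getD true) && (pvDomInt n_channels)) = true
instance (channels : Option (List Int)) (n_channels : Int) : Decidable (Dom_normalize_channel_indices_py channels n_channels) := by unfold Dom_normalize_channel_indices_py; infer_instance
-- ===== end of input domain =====

-- B replaces A's min/max one-based probe by an all() scan and A's hash set + library sort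
-- (sorted(set(filter))) by a hand-written merge sort whose merge step fuses deduplication.

-- ===== PORT A =====
def normalize_channel_indices_py (channels : Option (List Int)) (n_channels : Int) : List Int :=
  if n_channels ≤ 0 then []
  else
    let ch := channels.getD []
    if ch = [] then PySem.List.pyRange 0 n_channels 1
    else
      let vals := ch.map (fun c => c)  -- int(ch) is the identity on int
      let vals2 :=
        if ((PySem.List.min? vals (fun v => v)).getD 0 ≥ 1 ∧
            (PySem.List.max? vals (fun v => v)).getD 0 ≤ n_channels)
        then vals.map (fun v => v - 1) else vals
      PySem.List.sorted
        (PySem.Set.ofList (vals2.filter (fun v => 0 ≤ v && v < n_channels)))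
        (fun v => v) false

-- ===== PORT B =====
-- B's merge: two-pointer merge of two lists; equal heads are emitted once (deduplicating merge)
def pvDmerge : List Int → List Int → List Int
  | [], b => b
  | x :: a, [] => x :: a
  | x :: a, y :: b =>
    if x < y then x :: pvDmerge a (y :: b)
    else if y < x then y :: pvDmerge (x :: a) b
    else x :: pvDmerge a b
termination_by a b => a.length + b.length

-- B's merge sort: split in half at len(xs)//2, sort the halves, merge with dedupe
def pvMsort (xs : List Int) : List Int :=
  if h : xs.length ≤ 1 then xs
  else
    let mid := xs.length / 2
    pvDmerge (pvMsort (xs.take mid)) (pvMsort (xs.drop mid))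
termination_by xs.length
decreasing_by
  · simpa using by omega
  · simpa using by omega

def normalize_channel_indices_py_alt (channels : Option (List Int)) (n_channels : Int) : List Int :=
  if n_channels ≤ 0 then []
  else
    let ch := channels.getD []
    if ch = [] then PySem.List.pyRange 0 n_channels 1
    else
      let vals := ch.map (fun c => c)
      let offset : Int := if vals.all (fun v => 1 ≤ v && v ≤ n_channels) then 1 else 0
      pvMsort ((vals.map (fun v => v - offset)).filter (fun w => 0 ≤ w && w < n_channels))

-- ===== PRECONDITION & SPEC =====
def Spec_normalize_channel_indices_py (channels : Option (List Int)) (n_channels : Int) (out : List Int) : Prop := out = normalize_channel_indices_py_alt channels n_channels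
instance (channels : Option (List Int)) (n_channels : Int) (out : List Int) : Decidable (Spec_normalize_channel_indices_py channels n_channels out) := by unfold Spec_normalize_channel_indices_py; infer_instance

-- ===== CLAIM =====
def Claim_equal_normalize_channel_indices_py : Prop := ∀ (channels : Option (List Int)) (n_channels : Int), Dom_normalize_channel_indices_py channels n_channels → Spec_normalize_channel_indices_py channels n_channels (normalize_channel_indices_py channels n_channels)

-- ===== LEMMAS AND PROOFS =====

theorem mem_pvDmerge : ∀ (a b : List Int) (z : Int), z ∈ pvDmerge a b ↔ z ∈ a ∨ z ∈ b := by
  intro a b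
  induction a, b using pvDmerge.induct with
  | case1 b => simp [pvDmerge]
  | case2 x a => simp [pvDmerge]
  | case3 x a y b hlt ih =>
    intro z; rw [pvDmerge, if_pos hlt]; simp [ih]; tauto
  | case4 x a y b hlt hgt ih =>
    intro z; rw [pvDmerge, if_neg hlt, if_pos hgt]; simp [ih]; tauto
  | case5 x a y b hlt hgt ih =>
    intro z
    rw [pvDmerge, if_neg hlt, if_neg hgt]
    have hxy : x = y := by omega
    simp [ih, hxy]; tauto

theorem pairwise_pvDmerge : ∀ (a b : List Int),
    a.Pairwise (· < ·) → b.Pairwise (· < ·) → (pvDmerge a b).Pairwise (· < ·) := by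
  intro a b
  induction a, b using pvDmerge.induct with
  | case1 b => intro _ hb; simpa [pvDmerge] using hb
  | case2 x a => intro ha _; simpa [pvDmerge] using ha
  | case3 x a y b hlt ih =>
    intro ha hb
    rw [pvDmerge, if_pos hlt]
    refine List.pairwise_cons.mpr ⟨?_, ih (List.pairwise_cons.mp ha).2 hb⟩
    intro z hz
    rcases (mem_pvDmerge a (y :: b) z).mp hz with h | h
    · exact (List.pairwise_cons.mp ha).1 z h
    · rcases List.mem_cons.mp h with rfl | h'
      · exact hlt
      · exact lt_trans hlt ((List.pairwise_cons.mp hb).1 z h')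
  | case4 x a y b hlt hgt ih =>
    intro ha hb
    rw [pvDmerge, if_neg hlt, if_pos hgt]
    refine List.pairwise_cons.mpr ⟨?_, ih ha (List.pairwise_cons.mp hb).2⟩
    intro z hz
    rcases (mem_pvDmerge (x :: a) b z).mp hz with h | h
    · rcases List.mem_cons.mp h with rfl | h'
      · exact hgt
      · exact lt_trans hgt ((List.pairwise_cons.mp ha).1 z h')
    · exact (List.pairwise_cons.mp hb).1 z h
  | case5 x a y b hlt hgt ih =>
    intro ha hb
    rw [pvDmerge, if_neg hlt, if_neg hgt]
    have hxy : x = y := by omega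
    refine List.pairwise_cons.mpr ⟨?_, ih (List.pairwise_cons.mp ha).2 (List.pairwise_cons.mp hb).2⟩
    intro z hz
    rcases (mem_pvDmerge a b z).mp hz with h | h
    · exact (List.pairwise_cons.mp ha).1 z h
    · exact hxy ▸ (List.pairwise_cons.mp hb).1 z h

theorem pvMsort_spec : ∀ (xs : List Int),
    (pvMsort xs).Pairwise (· < ·) ∧ ∀ z, z ∈ pvMsort xs ↔ z ∈ xs := by
  intro xs
  induction xs using pvMsort.induct with
  | case1 xs h =>
    rw [pvMsort, dif_pos h]
    refine ⟨?_, fun z => Iff.rfl⟩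
    match xs, h with
    | [], _ => exact List.Pairwise.nil
    | [x], _ => exact List.pairwise_singleton _ _
  | case2 xs h mid iht ihd =>
    rw [pvMsort, dif_neg h]
    constructor
    · exact pairwise_pvDmerge _ _ iht.1 ihd.1
    · intro z
      rw [mem_pvDmerge, iht.2, ihd.2]
      constructor
      · rintro (h' | h')
        · exact List.mem_of_mem_take h'
        · exact List.mem_of_mem_drop h'
      · intro h'
        exact List.mem_append.mp (by rw [List.take_append_drop mid xs]; exact h')

-- sorted(set(L)) is the strictly increasing list with L's members — which pvMsort L is too
theorem core_eq (L : List Int) :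
    PySem.List.sorted (PySem.Set.ofList L) (fun v => v) false = pvMsort L := by
  obtain ⟨hp, hm⟩ := pvMsort_spec L
  apply PySem.List.sorted_eq_of_perm_of_pairwise_lt
  · rw [List.perm_ext_iff_of_nodup (hp.imp (fun hab => ne_of_lt hab)) (PySem.Set.nodup_ofList _)]
    intro x
    rw [hm x, PySem.Set.mem_ofList]
  · exact hp

-- with a nonempty list, "min ≥ 1 and max ≤ n" is the all() scan
theorem minmax_all (n : Int) (ch : List Int) (hne : ch ≠ []) :
    ((PySem.List.min? ch (fun v => v)).getD 0 ≥ 1 ∧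
     (PySem.List.max? ch (fun v => v)).getD 0 ≤ n)
    ↔ ch.all (fun v => 1 ≤ v && v ≤ n) = true := by
  obtain ⟨m, hm⟩ : ∃ m, PySem.List.min? ch (fun v => v) = some m := by
    cases h : PySem.List.min? ch (fun v => v) with
    | none => exact absurd ((PySem.List.min?_eq_none_iff ch _).mp h) hne
    | some m => exact ⟨m, rfl⟩
  obtain ⟨M, hM⟩ : ∃ M, PySem.List.max? ch (fun v => v) = some M := by
    cases h : PySem.List.max? ch (fun v => v) with
    | none => exact absurd ((PySem.List.max?_eq_none_iff ch (fun v => v)).mp h) hne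
    | some M => exact ⟨M, rfl⟩
  rw [hm, hM]
  simp only [Option.getD_some, List.all_eq_true, Bool.and_eq_true, decide_eq_true_eq]
  constructor
  · rintro ⟨h1, h2⟩ v hv
    exact ⟨le_trans h1 (PySem.List.min?_isMin hm v hv),
          le_trans (PySem.List.max?_isMax hM v hv) h2⟩
  · intro h
    exact ⟨(h m (PySem.List.min?_mem hm)).1, (h M (PySem.List.max?_mem hM)).2⟩

-- ===== VERDICT =====
theorem normalize_channel_indices_py_spec : Claim_equal_normalize_channel_indices_py := by
  intro channels n _
  unfold Spec_normalize_channel_indices_py normalize_channel_indices_py normalize_channel_indices_py_alt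
  by_cases hn : n ≤ 0
  · simp [hn]
  rw [if_neg hn, if_neg hn]
  by_cases hch : channels.getD [] = []
  · simp [hch]
  simp only [if_neg hch]
  have hid : (channels.getD []).map (fun c => c) = channels.getD [] := List.map_id' _
  rw [hid]
  by_cases hall : (channels.getD []).all (fun v => 1 ≤ v && v ≤ n) = true
  · rw [if_pos ((minmax_all n _ hch).mpr hall), if_pos hall]
    exact core_eq _
  · rw [if_neg (fun h => hall ((minmax_all n _ hch).mp h)), if_neg hall]
    have := core_eq (((channels.getD []).map (fun v => v - 0)).filter (fun w => 0 ≤ w && w < n))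
    simpa using this
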